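-- pv_equiv track=rewrite | github.com/earikan/CSE-321 | hw4/lcp_131044050.py | longest_common_postfix_wrapper
-- ===== SOURCE A (Python) =====
-- def min_length(firstStr, secondStr):
--     if(len(firstStr) > len(secondStr)):
--         return len(secondStr)
--     else:
--         return len(firstStr)
--
-- def longest_common_postfix_micro(firstStr, secondStr):
--     output = ""
--     for i in range(0, min_length(firstStr, secondStr)):
--         if(firstStr[i] == secondStr[i]):
--             output += (firstStr[i])
--
--     return output
--
-- def longest_common_postfix_wrapper(start, end, stringList):
--     if (start == end):
--         return stringList[start]
--
--     if(end > start):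
--         mid = start + (end - start) // 2;
--         firstStr = longest_common_postfix_wrapper(start, mid, stringList);
--         secondStr = longest_common_postfix_wrapper(mid + 1, end, stringList);
--
--         return (longest_common_postfix_micro(firstStr, secondStr));
-- ===== SOURCE B (Python) =====
-- def longest_common_postfix_wrapper(start, end, stringList):
--     if end < start:
--         return None
--     work = [("range", start, end)]
--     vals = []
--     while work:
--         item = work.pop()
--         if item[0] == "range":
--             _, s, e = item
--             if s == e:
--                 vals.append(stringList[s])
--             else:
--                 mid = s + (e - s) // 2
--                 work.append(("combine",))
--                 work.append(("range", mid + 1, e))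
--                 work.append(("range", s, mid))
--         else:
--             second = vals.pop()
--             first = vals.pop()
--             vals.append("".join(a for a, b in zip(first, second) if a == b))
--     return vals.pop()
-- ===== Notes on version B (the rewrite author's own statement) =====
-- stated objective: alternative
-- what changed: Replaced the recursive divide-and-conquer with an explicit worklist machine doing a post-order traversal of the same split tree (a value stack plus range/combine tasks), and the index-loop char combiner with a zip-based filter.
import Mathlib
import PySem

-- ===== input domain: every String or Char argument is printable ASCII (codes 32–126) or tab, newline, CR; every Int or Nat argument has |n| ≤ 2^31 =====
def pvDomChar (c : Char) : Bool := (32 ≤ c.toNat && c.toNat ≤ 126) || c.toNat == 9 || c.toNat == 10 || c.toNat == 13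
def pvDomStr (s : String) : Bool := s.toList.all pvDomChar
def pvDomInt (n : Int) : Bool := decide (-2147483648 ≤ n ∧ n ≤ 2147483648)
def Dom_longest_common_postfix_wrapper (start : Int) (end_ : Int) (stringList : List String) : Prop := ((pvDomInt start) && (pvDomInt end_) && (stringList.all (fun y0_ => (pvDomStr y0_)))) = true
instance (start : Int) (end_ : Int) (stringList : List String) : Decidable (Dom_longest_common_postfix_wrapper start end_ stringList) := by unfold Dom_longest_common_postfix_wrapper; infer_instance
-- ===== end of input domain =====

-- B replaces the recursion by an explicit worklist (post-order over the same split tree); objective: alternative decomposition, same cost.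

-- ===== PORT A =====
def pv_min_length (a b : String) : Int :=
  if PySem.Str.len a > PySem.Str.len b then PySem.Str.len b else PySem.Str.len a

-- for-loop over range(0, min_length) appending matching chars (chars via toList, exact)
def pv_microA (a b : String) : String :=
  String.ofList ((PySem.List.pyRange 0 (pv_min_length a b) 1).foldl (fun out i =>
    match PySem.List.pyGet? a.toList i, PySem.List.pyGet? b.toList i with
    | some ca, some cb => if ca == cb then out ++ [ca] else out
    | _, _ => out) [])

def longest_common_postfix_wrapper (start : Int) (end_ : Int) (stringList : List String) : Option String :=
  if start == end_ then PySem.List.pyGet? stringList start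
  else if end_ > start then
    let mid := start + PySem.Int.floordiv (end_ - start) 2
    match longest_common_postfix_wrapper start mid stringList,
          longest_common_postfix_wrapper (mid + 1) end_ stringList with
    | some a, some b => some (pv_microA a b)
    | _, _ => none          -- a recursive call raised (index error): propagate
  else none                  -- Python falls through: returns None
termination_by (end_ - start).toNat
decreasing_by
  · have h2 : PySem.Int.floordiv (end_ - start) 2 = (end_ - start) / 2 :=
      PySem.Int.floordiv_eq_ediv_of_pos (by omega)
    simp only [h2]; omega
  · have h2 : PySem.Int.floordiv (end_ - start) 2 = (end_ - start) / 2 :=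
      PySem.Int.floordiv_eq_ediv_of_pos (by omega)
    simp only [h2]; omega

-- ===== PORT B =====
inductive PvTask where
  | range (s e : Int) : PvTask
  | combine : PvTask
deriving DecidableEq, Repr

-- ''.join(a for a, b in zip(first, second) if a == b)
def pv_microB (la lb : List Char) : List Char :=
  (la.zip lb).filterMap (fun p => if p.1 == p.2 then some p.1 else none)

def pvTaskWeight : PvTask → Nat
  | .range s e => 4 * (e - s).toNat + 2
  | .combine => 1

def pvMeasure (ts : List PvTask) : Nat := (ts.map pvTaskWeight).sum

-- the while-loop: work stack of tasks, vals stack of results; none = an index error in Python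
def pv_loop (xs : List String) : List PvTask → List String → Option String
  | [], v :: _ => some v
  | [], [] => none
  | .range s e :: ts, vs =>
    if s == e then
      match PySem.List.pyGet? xs s with
      | some v => pv_loop xs ts (v :: vs)
      | none => none
    else if s < e then
      let mid := s + PySem.Int.floordiv (e - s) 2
      pv_loop xs (.range s mid :: .range (mid + 1) e :: .combine :: ts) vs
    else none               -- unreachable from the entry (ranges stay nonempty); totality guard
  | .combine :: ts, b :: a :: vs => pv_loop xs ts (String.ofList (pv_microB a.toList b.toList) :: vs)
  | .combine :: _, _ => none -- unreachable: a combine always has two values below it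
termination_by ts _ => pvMeasure ts
decreasing_by
  all_goals simp only [pvMeasure, pvTaskWeight, List.map, List.sum_cons]
  all_goals try omega
  all_goals (rw [PySem.Int.floordiv_eq_ediv_of_pos (a := e - s) (by omega : (0:Int) < 2)]; omega)

def longest_common_postfix_wrapper_alt (start : Int) (end_ : Int) (stringList : List String) : Option String :=
  if end_ < start then none
  else pv_loop stringList [.range start end_] []

-- ===== PRECONDITION & SPEC =====
-- Pre_ excludes exactly the inputs where Python A raises IndexError: a nonempty range [start, end_]
-- reaching a list index outside [-len, len).
def Pre_longest_common_postfix_wrapper (start : Int) (end_ : Int) (stringList : List String) : Prop :=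
  end_ < start ∨ (-(stringList.length : Int) ≤ start ∧ end_ < (stringList.length : Int))
instance (start : Int) (end_ : Int) (stringList : List String) : Decidable (Pre_longest_common_postfix_wrapper start end_ stringList) := by unfold Pre_longest_common_postfix_wrapper; infer_instance

def pvWitness_longest_common_postfix_wrapper : Int × Int × List String := (0, 2, ["abc", "axc", "abd"])

def Spec_longest_common_postfix_wrapper (start : Int) (end_ : Int) (stringList : List String) (out : Option String) : Prop := out = longest_common_postfix_wrapper_alt start end_ stringList
instance (start : Int) (end_ : Int) (stringList : List String) (out : Option String) : Decidable (Spec_longest_common_postfix_wrapper start end_ stringList out) := by unfold Spec_longest_common_postfix_wrapper; infer_instance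

-- ===== CLAIM (what is proved, stated in full; the proofs are below) =====
def Claim_equal_longest_common_postfix_wrapper : Prop := ∀ (start : Int) (end_ : Int) (stringList : List String), Dom_longest_common_postfix_wrapper start end_ stringList → Pre_longest_common_postfix_wrapper start end_ stringList → Spec_longest_common_postfix_wrapper start end_ stringList (longest_common_postfix_wrapper start end_ stringList)

-- ===== LEMMAS AND PROOFS =====

theorem pv_micro_fold (la lb : List Char) (n : Nat) (h : n ≤ min la.length lb.length) (acc : List Char) :
    (PySem.List.pyRange 0 (n : Int) 1).foldl (fun out i =>
      match PySem.List.pyGet? la i, PySem.List.pyGet? lb i with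
      | some ca, some cb => if ca == cb then out ++ [ca] else out
      | _, _ => out) acc = acc ++ ((la.zip lb).take n).filterMap (fun p => if p.1 == p.2 then some p.1 else none) := by
  induction n with
  | zero => simp [PySem.List.pyRange]
  | succ m ih =>
    have hm : m ≤ min la.length lb.length := by omega
    have hr : PySem.List.pyRange 0 ((m:Int) + 1) 1 = PySem.List.pyRange 0 (m:Int) 1 ++ [(m:Int)] := by
      exact PySem.List.pyRange_one_succ_right (by omega)
    have hcast : ((m + 1 : Nat) : Int) = (m : Int) + 1 := by push_cast; ring
    rw [hcast, hr, List.foldl_append, ih hm]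
    have hla : m < la.length := by omega
    have hlb : m < lb.length := by omega
    have hz : m < (la.zip lb).length := by simp [List.length_zip]; omega
    simp only [List.foldl]
    rw [PySem.List.pyGet?_natCast, PySem.List.pyGet?_natCast]
    rw [List.getElem?_eq_getElem hla, List.getElem?_eq_getElem hlb]
    rw [List.take_succ_eq_append_getElem hz]
    simp [List.getElem_zip]
    split_ifs with hc <;> simp [List.filterMap, hc]

theorem pv_micro_eq (a b : String) : pv_microA a b = String.ofList (pv_microB a.toList b.toList) := by
  have hlen : pv_min_length a b = ((min a.toList.length b.toList.length : Nat) : Int) := by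
    simp [pv_min_length, PySem.Str.len]
    split_ifs <;> omega
  unfold pv_microA pv_microB
  rw [hlen, pv_micro_fold a.toList b.toList _ (le_refl _) []]
  rw [List.take_of_length_le (by simp [List.length_zip])]
  simp

theorem pv_loop_range (xs : List String) (d : Nat) :
    ∀ (s e : Int) (ts : List PvTask) (vs : List String), (e - s).toNat = d → s ≤ e →
    pv_loop xs (.range s e :: ts) vs =
      match longest_common_postfix_wrapper s e xs with
      | some v => pv_loop xs ts (v :: vs)
      | none => none := by
  induction d using Nat.strong_induction_on with
  | _ d ih =>
    intro s e ts vs hd hse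
    by_cases heq : s = e
    · subst heq
      rw [pv_loop, longest_common_postfix_wrapper]
      simp
    · have hlt : s < e := lt_of_le_of_ne hse heq
      have h2 : PySem.Int.floordiv (e - s) 2 = (e - s) / 2 :=
        PySem.Int.floordiv_eq_ediv_of_pos (by omega)
      rw [pv_loop, longest_common_postfix_wrapper]
      simp only [heq, hlt, beq_iff_eq, if_false, if_true]
      set mid := s + PySem.Int.floordiv (e - s) 2 with hmid
      have hsm : s ≤ mid := by rw [hmid, h2]; omega
      have hme : mid < e := by rw [hmid, h2]; omega
      have hdl : (mid - s).toNat < d := by rw [hmid, h2]; omega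
      have hdr : (e - (mid + 1)).toNat < d := by rw [hmid, h2]; omega
      rw [ih _ hdl s mid _ vs rfl hsm]
      cases hA : longest_common_postfix_wrapper s mid xs with
      | none => simp
      | some a =>
        simp only []
        rw [ih _ hdr (mid + 1) e _ (a :: vs) rfl (by omega)]
        cases hB : longest_common_postfix_wrapper (mid + 1) e xs with
        | none => simp
        | some b =>
          simp only []
          rw [pv_loop, pv_micro_eq]

-- ===== VERDICT (by name: the statement is the Claim_ definition above) =====
theorem longest_common_postfix_wrapper_spec : Claim_equal_longest_common_postfix_wrapper := by
  intro s e xs _ _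
  unfold Spec_longest_common_postfix_wrapper longest_common_postfix_wrapper_alt
  by_cases h : e < s
  · rw [if_pos h, longest_common_postfix_wrapper]
    simp only [beq_iff_eq]
    rw [if_neg (by omega : ¬ s = e), if_neg (by omega : ¬ e > s)]
  · rw [if_neg h, pv_loop_range xs (e - s).toNat s e [] [] rfl (by omega)]
    cases hA : longest_common_postfix_wrapper s e xs with
    | none => rfl
    | some v => simp [pv_loop]
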